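-- pv_equiv track=rewrite | github.com/mosaicml/streaming | benchmarks/backends/generate_datasets.py | _splits_by_size
-- ===== SOURCE A (Python) =====
-- from collections import defaultdict
-- from typing import Any, Dict, Iterable, List, Optional, Tuple
--
-- def _splits_by_size(dataset: Dict[str, Tuple[List[int], List[str]]]) -> Iterable[str]:
--     """Order a dataset's splits by their size in samples, then by name.
--
--     Argxs:
--         dataset (Dict[str, Tuple[List[int], List[str]]]): Mapping of split name to split data.
--
--     Returns:
--         Iterable[str]: Ordered split names.
--     """
--     size2splits = defaultdict(list)
--     for split, (nums, _) in dataset.items():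
--         size2splits[len(nums)].append(split)
--
--     splits_by_size = []
--     for size in sorted(size2splits):
--         for split in sorted(size2splits[size]):
--             splits_by_size.append(split)
--
--     return splits_by_size
-- ===== SOURCE B (Python) =====
-- def _splits_by_size(dataset):
--     """Order a dataset's splits by their size in samples, then by name."""
--     return sorted(dataset, key=lambda split: (len(dataset[split][0]), split))
-- ===== Notes on version B (the rewrite author's own statement) =====
-- stated objective: simpler
-- what changed: Replaces the defaultdict size-bucketing followed by two nested sorts and an appending loop with a single composite-key sort of the split names keyed by (sample count, name); Pre_ only excludes duplicate-name association lists, which cannot represent a Python dict.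
import Mathlib
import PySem

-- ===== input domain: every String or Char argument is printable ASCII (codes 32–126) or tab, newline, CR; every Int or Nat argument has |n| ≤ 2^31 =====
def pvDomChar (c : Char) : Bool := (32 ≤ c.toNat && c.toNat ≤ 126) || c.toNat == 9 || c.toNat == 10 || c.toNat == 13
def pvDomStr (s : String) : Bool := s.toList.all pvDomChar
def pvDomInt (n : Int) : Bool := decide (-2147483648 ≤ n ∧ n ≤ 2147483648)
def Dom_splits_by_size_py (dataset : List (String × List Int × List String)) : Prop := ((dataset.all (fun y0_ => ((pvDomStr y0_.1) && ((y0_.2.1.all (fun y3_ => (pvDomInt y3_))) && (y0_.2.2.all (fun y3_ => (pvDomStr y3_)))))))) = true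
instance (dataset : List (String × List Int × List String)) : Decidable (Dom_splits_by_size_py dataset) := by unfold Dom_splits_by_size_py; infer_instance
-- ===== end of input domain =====

-- B replaces A's defaultdict bucketing + two nested sorts with one composite-key sort
-- of the split names keyed by (sample count, name); equal cost, simpler decomposition.

-- ===== PORT A =====
def splits_by_size_py (dataset : List (String × List Int × List String)) : List String :=
  let size2splits : PySem.Dict Int (List String) :=
    dataset.foldl (fun d p => d.modify ((p.2.1.length : Int)) [] (fun v => v ++ [p.1]))
      PySem.Dict.empty
  (PySem.List.sorted size2splits.keys (fun x => x)).foldl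
    (fun acc size =>
      (PySem.List.sorted (size2splits.getD size []) (fun x => x)).foldl
        (fun acc split => acc ++ [split]) acc) []

-- ===== PORT B =====
def splits_by_size_py_alt (dataset : List (String × List Int × List String)) : List String :=
  PySem.List.sorted2 (dataset.map (·.1))
    (fun split => (((PySem.Dict.mk dataset).getD split ([], [])).1.length : Int))
    (fun split => split)

-- ===== PRECONDITION & SPEC =====
-- Pre_ excludes association lists with duplicate split names: such lists cannot represent the
-- Python dict argument (dict keys are unique), and the two ports may order duplicates differently.
def Pre_splits_by_size_py (dataset : List (String × List Int × List String)) : Prop :=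
  (dataset.map (·.1)).Nodup
instance (dataset : List (String × List Int × List String)) : Decidable (Pre_splits_by_size_py dataset) := by unfold Pre_splits_by_size_py; infer_instance

def pvWitness_splits_by_size_py : (List (String × List Int × List String)) :=
  [("b", ([1, 2], ["x"])), ("a", ([3], []))]

def Spec_splits_by_size_py (dataset : List (String × List Int × List String)) (out : List String) : Prop := out = splits_by_size_py_alt dataset
instance (dataset : List (String × List Int × List String)) (out : List String) : Decidable (Spec_splits_by_size_py dataset out) := by unfold Spec_splits_by_size_py; infer_instance

-- ===== CLAIM (what is proved, stated in full; the proofs are below) =====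
def Claim_equal_splits_by_size_py : Prop := ∀ (dataset : List (String × List Int × List String)), Dom_splits_by_size_py dataset → Pre_splits_by_size_py dataset → Spec_splits_by_size_py dataset (splits_by_size_py dataset)

-- ===== LEMMAS AND PROOFS =====

-- the (size, name) pair list underlying A's bucketing
def pvPairs (dataset : List (String × List Int × List String)) : List (Int × String) :=
  dataset.map (fun p => ((p.2.1.length : Int), p.1))

-- A's bucket for a given size
def pvBucket (dataset : List (String × List Int × List String)) (size : Int) : List String :=
  ((pvPairs dataset).filter (fun q => q.1 == size)).map (·.2)

-- B's size lookup for a name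
def pvLk (dataset : List (String × List Int × List String)) (s : String) : Int :=
  (((PySem.Dict.mk dataset).getD s ([], [])).1.length : Int)

-- B's composite key, as a lexicographic value
def pvKey (dataset : List (String × List Int × List String)) (s : String) : Lex (Int × String) :=
  toLex (pvLk dataset s, s)

-- Python's tuple-key sort is the sort by the lexicographic product key
lemma sorted2_eq_sorted_lex {α : Type} (xs : List α) (k1 : α → Int) (k2 : α → String) :
    PySem.List.sorted2 xs k1 k2 =
      PySem.List.sorted xs (fun x => (toLex (k1 x, k2 x) : Lex (Int × String))) := by
  have hb : (fun a b => decide (k1 a < k1 b) || (!decide (k1 b < k1 a) && decide (k2 a < k2 b)))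
      = (fun a b => decide ((toLex (k1 a, k2 a) : Lex (Int × String)) < toLex (k1 b, k2 b))) := by
    funext a b
    simp only [Prod.Lex.lt_iff, ofLex_toLex]
    rcases lt_trichotomy (k1 a) (k1 b) with h | h | h
    · simp [h]
    · simp [h]
    · have hne : k1 a ≠ k1 b := by omega
      simp [h, asymm h, hne]
  simp only [PySem.List.sorted2, PySem.List.sorted, Bool.false_eq_true, if_false, hb]

-- characterisation of A's output: buckets flattened in size order
lemma A_shape (dataset : List (String × List Int × List String)) :
    splits_by_size_py dataset
      = (PySem.List.sorted (PySem.Set.ofList ((pvPairs dataset).map (·.1))) (fun x => x)).flatMap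
          (fun size => PySem.List.sorted (pvBucket dataset size) (fun x => x)) := by
  have e0 : splits_by_size_py dataset =
      (PySem.List.sorted ((dataset.foldl
          (fun d p => d.modify ((p.2.1.length : Int)) [] (fun v => v ++ [p.1]))
          PySem.Dict.empty).keys) (fun x => x)).foldl
        (fun acc size =>
          (PySem.List.sorted ((dataset.foldl
              (fun d p => d.modify ((p.2.1.length : Int)) [] (fun v => v ++ [p.1]))
              PySem.Dict.empty).getD size []) (fun x => x)).foldl
            (fun acc split => acc ++ [split]) acc) [] := rfl
  rw [e0]
  have hfold : dataset.foldl
      (fun d p => d.modify ((p.2.1.length : Int)) [] (fun v => v ++ [p.1])) PySem.Dict.empty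
      = (pvPairs dataset).foldl (fun d q => d.modify q.1 [] (fun v => v ++ [q.2]))
          PySem.Dict.empty := by
    rw [pvPairs, List.foldl_map]
  have hkeys : ((pvPairs dataset).foldl (fun d q => d.modify q.1 [] (fun v => v ++ [q.2]))
      PySem.Dict.empty).keys = PySem.Set.ofList ((pvPairs dataset).map (·.1)) := by
    rw [PySem.Dict.keys_foldl_modify_key (pvPairs dataset) (fun q => q.1) []
        (fun _ q => (fun v => v ++ [q.2])) PySem.Dict.empty]
    simp [PySem.Dict.keys_empty, PySem.Set.update_nil_left]
  have hget : ∀ size, ((pvPairs dataset).foldl (fun d q => d.modify q.1 [] (fun v => v ++ [q.2]))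
      PySem.Dict.empty).getD size [] = pvBucket dataset size := by
    intro size
    rw [PySem.Dict.getD_foldl_modify_append]
    simp [pvBucket, PySem.Dict.getD_empty]
  rw [hfold]
  simp only [hkeys, hget]
  simp only [PySem.List.foldl_append_singleton, PySem.List.foldl_append_eq_flatMap,
    List.nil_append]

-- characterisation of B's output
lemma B_shape (dataset : List (String × List Int × List String)) :
    splits_by_size_py_alt dataset
      = PySem.List.sorted (dataset.map (·.1)) (pvKey dataset) := by
  unfold splits_by_size_py_alt
  rw [sorted2_eq_sorted_lex]
  rfl

-- every name in A's bucket for `size` has B's lookup size equal to `size`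
lemma lk_of_mem_bucket (dataset : List (String × List Int × List String))
    (hpre : (dataset.map (·.1)).Nodup) {size : Int} {s : String}
    (hs : s ∈ pvBucket dataset size) : pvLk dataset s = size := by
  unfold pvBucket pvPairs at hs
  rw [List.mem_map] at hs
  obtain ⟨q, hq, rfl⟩ := hs
  rw [List.mem_filter] at hq
  obtain ⟨hqm, hqsz⟩ := hq
  rw [List.mem_map] at hqm
  obtain ⟨p, hp, rfl⟩ := hqm
  have hitems : (p.1, p.2) ∈ (PySem.Dict.mk dataset).items := by
    simpa using hp
  have hg := PySem.Dict.getD_of_mem_items (PySem.Dict.mk dataset) hitems (by simpa using hpre)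
    (([], []) : List Int × List String)
  have hsz : ((p.2.1.length : Int)) = size := by simpa using hqsz
  simp only [pvLk]
  rw [hg]
  exact hsz

-- A's bucket contains no duplicate names
lemma bucket_nodup (dataset : List (String × List Int × List String))
    (hpre : (dataset.map (·.1)).Nodup) (size : Int) : (pvBucket dataset size).Nodup := by
  have hsub : (pvBucket dataset size).Sublist ((pvPairs dataset).map (·.2)) := by
    unfold pvBucket
    exact List.Sublist.map _ List.filter_sublist
  have : ((pvPairs dataset).map (·.2)).Nodup := by
    simpa [pvPairs, List.map_map, Function.comp] using hpre
  exact this.sublist hsub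
-- flattening the per-value filters over a duplicate-free covering list of values is a permutation
lemma flatMap_filter_perm (pairs : List (Int × String)) (cs : List Int)
    (hnd : cs.Nodup) (hcov : ∀ q ∈ pairs, q.1 ∈ cs) :
    (cs.flatMap (fun c => (pairs.filter (fun q => q.1 == c)).map (·.2))).Perm
      (pairs.map (·.2)) := by
  induction cs generalizing pairs with
  | nil =>
      cases pairs with
      | nil => simp
      | cons q t => exact absurd (hcov q (by simp)) (by simp)
  | cons c cs ih =>
      rw [List.flatMap_cons]
      have hccs : c ∉ cs := (List.nodup_cons.mp hnd).1
      have hrest : ∀ c' ∈ cs,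
          (pairs.filter (fun q => q.1 == c')).map (·.2)
            = ((pairs.filter (fun q => !(q.1 == c))).filter (fun q => q.1 == c')).map (·.2) := by
        intro c' hc'
        have hne : c' ≠ c := fun h => hccs (h ▸ hc')
        congr 1
        rw [List.filter_filter]
        apply List.filter_congr
        intro q _
        rcases eq_or_ne q.1 c' with h | h <;> simp [h, hne]
      have hperm2 : (cs.flatMap (fun c' => (pairs.filter (fun q => q.1 == c')).map (·.2))).Perm
          (((pairs.filter (fun q => !(q.1 == c))).map (·.2))) := by
        have := ih (pairs.filter (fun q => !(q.1 == c))) (List.nodup_cons.mp hnd).2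
          (by
            intro q hq
            rw [List.mem_filter] at hq
            have := hcov q hq.1
            simp only [List.mem_cons] at this
            rcases this with h | h
            · exact absurd h (by simpa using hq.2)
            · exact h)
        refine List.Perm.trans ?_ this
        exact List.Perm.flatMap_left cs (fun c' hc' => by rw [hrest c' hc'])
      refine List.Perm.trans (List.Perm.append_left _ hperm2) ?_
      rw [← List.map_append]
      exact (List.filter_append_perm _ pairs).map (·.2)

-- A's output is a permutation of the split names
lemma A_perm (dataset : List (String × List Int × List String)) :
    (splits_by_size_py dataset).Perm (dataset.map (·.1)) := by
  rw [A_shape]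
  have h1 : ((PySem.List.sorted (PySem.Set.ofList ((pvPairs dataset).map (·.1))) (fun x => x)).flatMap
      (fun size => PySem.List.sorted (pvBucket dataset size) (fun x => x))).Perm
      ((PySem.List.sorted (PySem.Set.ofList ((pvPairs dataset).map (·.1))) (fun x => x)).flatMap
        (fun size => pvBucket dataset size)) :=
    List.Perm.flatMap_left _ (fun size _ => PySem.List.sorted_perm _ _ _)
  have h2 : ((PySem.List.sorted (PySem.Set.ofList ((pvPairs dataset).map (·.1))) (fun x => x)).flatMap
      (fun size => pvBucket dataset size)).Perm
      ((PySem.Set.ofList ((pvPairs dataset).map (·.1))).flatMap (fun size => pvBucket dataset size)) :=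
    List.Perm.flatMap_right _ (PySem.List.sorted_perm _ _ _)
  have h3 := flatMap_filter_perm (pvPairs dataset) (PySem.Set.ofList ((pvPairs dataset).map (·.1)))
    (PySem.Set.nodup_ofList _)
    (fun q hq => by
      rw [PySem.Set.mem_ofList]
      exact List.mem_map_of_mem hq)
  have h4 : ((pvPairs dataset).map (·.2)) = dataset.map (·.1) := by
    simp [pvPairs, List.map_map, Function.comp]
  have h5 := (h1.trans h2).trans (by simpa [pvBucket] using h3)
  rwa [h4] at h5

-- A's output is strictly increasing under B's composite key
lemma A_pairwise (dataset : List (String × List Int × List String))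
    (hpre : (dataset.map (·.1)).Nodup) :
    (splits_by_size_py dataset).Pairwise (fun a b => pvKey dataset a < pvKey dataset b) := by
  rw [A_shape, List.pairwise_flatMap]
  constructor
  · intro size _
    have hle := PySem.List.sorted_pairwise (pvBucket dataset size) (fun x => x)
    have hnd : (PySem.List.sorted (pvBucket dataset size) (fun x => x)).Nodup :=
      (PySem.List.sorted_perm _ _ _).nodup_iff.mpr (bucket_nodup dataset hpre size)
    have hlt : (PySem.List.sorted (pvBucket dataset size) (fun x => x)).Pairwise
        (fun a b => a < b) :=
      (hle.and hnd).imp (fun h => lt_of_le_of_ne h.1 h.2)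
    refine List.Pairwise.imp_of_mem ?_ hlt
    intro a b ha hb hab
    have hka : pvLk dataset a = size :=
      lk_of_mem_bucket dataset hpre ((PySem.List.mem_sorted _ _ _ _).mp ha)
    have hkb : pvLk dataset b = size :=
      lk_of_mem_bucket dataset hpre ((PySem.List.mem_sorted _ _ _ _).mp hb)
    simp only [pvKey, Prod.Lex.lt_iff, ofLex_toLex]
    exact Or.inr ⟨by rw [hka, hkb], hab⟩
  · have hszs := PySem.List.sorted_ofList_pairwise_lt ((pvPairs dataset).map (·.1))
    refine hszs.imp ?_
    intro s1 s2 h12 x hx y hy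
    have hkx : pvLk dataset x = s1 :=
      lk_of_mem_bucket dataset hpre ((PySem.List.mem_sorted _ _ _ _).mp hx)
    have hky : pvLk dataset y = s2 :=
      lk_of_mem_bucket dataset hpre ((PySem.List.mem_sorted _ _ _ _).mp hy)
    simp only [pvKey, Prod.Lex.lt_iff, ofLex_toLex]
    exact Or.inl (by rw [hkx, hky]; exact h12)

-- ===== VERDICT (by name: the statement is the Claim_ definition above) =====
theorem splits_by_size_py_spec : Claim_equal_splits_by_size_py := by
  intro dataset _ hpre
  unfold Spec_splits_by_size_py
  rw [B_shape]
  exact (PySem.List.sorted_eq_of_perm_of_pairwise_lt _ _ _ (A_perm dataset)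
    (A_pairwise dataset hpre)).symm
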